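-- pv_equiv track=rewrite | github.com/Lokno/aoc2021 | day23.py | path_clear
-- ===== SOURCE A (Python) =====
-- def path_clear(x1,y1,x2,y2,x_major,pod_dict):
--     path_clear = True
--     while (x1,y1) != (x2,y2):
--         if x_major:
--             if x1 > x2:
--                 x1 -= 1
--             elif x1 < x2:
--                 x1 += 1
--             elif y1 > y2:
--                 y1 -= 1
--             elif y1 < y2:
--                 y1 += 1
--         else:
--             if y1 > y2:
--                 y1 -= 1
--             elif y1 < y2:
--                 y1 += 1
--             elif x1 > x2:
--                 x1 -= 1
--             elif x1 < x2:
--                 x1 += 1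
--         if (x1,y1) in pod_dict:
--             path_clear = False
--             break
--     return path_clear
-- ===== SOURCE B (Python) =====
-- def _on_path(key, x1, y1, x2, y2, x_major):
--     if len(key) != 2:
--         return False
--     x, y = key
--     if x_major:
--         return (y == y1 and x != x1 and min(x1, x2) <= x <= max(x1, x2)) or \
--                (x == x2 and y != y1 and min(y1, y2) <= y <= max(y1, y2))
--     else:
--         return (x == x1 and y != y1 and min(y1, y2) <= y <= max(y1, y2)) or \
--                (y == y2 and x != x1 and min(x1, x2) <= x <= max(x1, x2))
--
-- def path_clear(x1, y1, x2, y2, x_major, pod_dict):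
--     for key in pod_dict:
--         if _on_path(key, x1, y1, x2, y2, x_major):
--             return False
--     return True
-- ===== Notes on version B (the rewrite author's own statement) =====
-- stated objective: alternative
-- what changed: Instead of walking the L-path cell by cell and testing dict membership at each step, B derives closed-form coordinate bounds for the two legs and scans the occupants once, testing each against those bounds.
import Mathlib
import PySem

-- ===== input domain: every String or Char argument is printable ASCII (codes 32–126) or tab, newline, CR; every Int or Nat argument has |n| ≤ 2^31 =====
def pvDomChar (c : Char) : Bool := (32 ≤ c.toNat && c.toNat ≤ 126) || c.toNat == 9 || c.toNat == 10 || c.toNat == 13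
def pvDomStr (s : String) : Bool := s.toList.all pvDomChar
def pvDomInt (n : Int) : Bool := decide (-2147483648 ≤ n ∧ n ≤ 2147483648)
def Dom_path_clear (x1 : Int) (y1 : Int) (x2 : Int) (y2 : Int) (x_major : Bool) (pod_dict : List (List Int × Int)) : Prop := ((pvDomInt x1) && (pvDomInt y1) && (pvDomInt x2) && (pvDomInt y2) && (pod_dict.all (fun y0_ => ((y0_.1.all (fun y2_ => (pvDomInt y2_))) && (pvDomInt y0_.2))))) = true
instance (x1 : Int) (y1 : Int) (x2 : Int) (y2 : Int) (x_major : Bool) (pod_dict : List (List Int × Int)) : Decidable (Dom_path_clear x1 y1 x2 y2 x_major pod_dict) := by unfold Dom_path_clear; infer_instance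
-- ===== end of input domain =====

-- Header: B iterates over the occupants and tests each against closed-form bounds of the
-- two L-legs instead of walking the path cell by cell (alternative decomposition, same result).

-- ===== PORT A =====
-- A-side helper: one iteration of the while-loop's movement (branches in Python order).
def pcStep (x1 : Int) (y1 : Int) (x2 : Int) (y2 : Int) (x_major : Bool) : Int × Int :=
  if x_major then
    if x1 > x2 then (x1 - 1, y1)
    else if x1 < x2 then (x1 + 1, y1)
    else if y1 > y2 then (x1, y1 - 1)
    else (x1, y1 + 1)   -- Python: 'elif y1 < y2'; under the loop guard this is exactly that case
  else
    if y1 > y2 then (x1, y1 - 1)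
    else if y1 < y2 then (x1, y1 + 1)
    else if x1 > x2 then (x1 - 1, y1)
    else (x1 + 1, y1)   -- Python: 'elif x1 < x2'; under the loop guard this is exactly that case

-- measure decrease for the loop, cited by decreasing_by
theorem pcStep_decr (x1 y1 x2 y2 : Int) (m : Bool) (h : ¬(x1 = x2 ∧ y1 = y2)) :
    ((pcStep x1 y1 x2 y2 m).1 - x2).natAbs + ((pcStep x1 y1 x2 y2 m).2 - y2).natAbs
      < (x1 - x2).natAbs + (y1 - y2).natAbs := by
  unfold pcStep
  cases m <;> simp only [Bool.false_eq_true, if_true, if_false] <;> split_ifs <;> simp <;> omega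

def path_clear (x1 : Int) (y1 : Int) (x2 : Int) (y2 : Int) (x_major : Bool) (pod_dict : List (List Int × Int)) : Bool :=
  if h : x1 = x2 ∧ y1 = y2 then true
  else
    let p := pcStep x1 y1 x2 y2 x_major
    if pod_dict.any (fun kv => kv.1 == [p.1, p.2]) then false
    else path_clear p.1 p.2 x2 y2 x_major pod_dict
termination_by (x1 - x2).natAbs + (y1 - y2).natAbs
decreasing_by exact pcStep_decr x1 y1 x2 y2 x_major h

-- ===== PORT B =====
-- B-side helper: is the occupant's cell on one of the two L-legs (start excluded)?
def pcOnPath (x1 : Int) (y1 : Int) (x2 : Int) (y2 : Int) (x_major : Bool) (k : List Int) : Bool :=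
  match k with
  | [x, y] =>
    if x_major then
      (x != x1 && y == y1 && decide (min x1 x2 ≤ x) && decide (x ≤ max x1 x2)) ||
      (x == x2 && y != y1 && decide (min y1 y2 ≤ y) && decide (y ≤ max y1 y2))
    else
      (x == x1 && y != y1 && decide (min y1 y2 ≤ y) && decide (y ≤ max y1 y2)) ||
      (y == y2 && x != x1 && decide (min x1 x2 ≤ x) && decide (x ≤ max x1 x2))
  | _ => false

def path_clear_alt (x1 : Int) (y1 : Int) (x2 : Int) (y2 : Int) (x_major : Bool) (pod_dict : List (List Int × Int)) : Bool :=
  pod_dict.all (fun kv => !pcOnPath x1 y1 x2 y2 x_major kv.1)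

-- ===== PRECONDITION & SPEC =====
def Spec_path_clear (x1 : Int) (y1 : Int) (x2 : Int) (y2 : Int) (x_major : Bool) (pod_dict : List (List Int × Int)) (out : Bool) : Prop := out = path_clear_alt x1 y1 x2 y2 x_major pod_dict
instance (x1 : Int) (y1 : Int) (x2 : Int) (y2 : Int) (x_major : Bool) (pod_dict : List (List Int × Int)) (out : Bool) : Decidable (Spec_path_clear x1 y1 x2 y2 x_major pod_dict out) := by unfold Spec_path_clear; infer_instance

-- ===== CLAIM (what is proved, stated in full; the proofs are below) =====
def Claim_equal_path_clear : Prop := ∀ (x1 : Int) (y1 : Int) (x2 : Int) (y2 : Int) (x_major : Bool) (pod_dict : List (List Int × Int)), Dom_path_clear x1 y1 x2 y2 x_major pod_dict → Spec_path_clear x1 y1 x2 y2 x_major pod_dict (path_clear x1 y1 x2 y2 x_major pod_dict)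

-- ===== LEMMAS AND PROOFS =====

-- at the destination the remaining path is empty
theorem pcOnPath_self (x2 y2 : Int) (m : Bool) (k : List Int) :
    pcOnPath x2 y2 x2 y2 m k = false := by
  match k with
  | [] => rfl
  | [_] => rfl
  | _ :: _ :: _ :: _ => rfl
  | [x, y] =>
    cases m <;> simp [pcOnPath] <;> omega

-- the path from (x1,y1) is the next cell plus the path from the next cell
theorem pcOnPath_step (x1 y1 x2 y2 : Int) (m : Bool) (h : ¬(x1 = x2 ∧ y1 = y2)) (k : List Int) :
    pcOnPath x1 y1 x2 y2 m k
      = ((k == [(pcStep x1 y1 x2 y2 m).1, (pcStep x1 y1 x2 y2 m).2])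
         || pcOnPath (pcStep x1 y1 x2 y2 m).1 (pcStep x1 y1 x2 y2 m).2 x2 y2 m k) := by
  match k with
  | [] => simp [pcOnPath]
  | [_] => simp [pcOnPath]
  | _ :: _ :: _ :: _ => simp [pcOnPath]
  | [x, y] =>
    unfold pcStep
    cases m <;> simp only [Bool.false_eq_true, if_true, if_false] <;>
      split_ifs <;>
      · rw [Bool.eq_iff_iff]
        simp [pcOnPath]
        omega

theorem path_clear_eq_all (x2 y2 : Int) (m : Bool) (pod : List (List Int × Int)) :
    ∀ (n : Nat) (x1 y1 : Int), (x1 - x2).natAbs + (y1 - y2).natAbs ≤ n →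
      path_clear x1 y1 x2 y2 m pod = pod.all (fun kv => !pcOnPath x1 y1 x2 y2 m kv.1) := by
  intro n
  induction n with
  | zero =>
    intro x1 y1 hle
    have hx : x1 = x2 ∧ y1 = y2 := by omega
    rw [path_clear]
    simp [hx.1, hx.2, pcOnPath_self]
  | succ n ih =>
    intro x1 y1 hle
    by_cases h : x1 = x2 ∧ y1 = y2
    · rw [path_clear]
      simp [h.1, h.2, pcOnPath_self]
    · rw [path_clear]
      simp only [h, dite_false]
      have hdec := pcStep_decr x1 y1 x2 y2 m h
      have hrec := ih (pcStep x1 y1 x2 y2 m).1 (pcStep x1 y1 x2 y2 m).2 (by omega)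
      by_cases hany : pod.any (fun kv => kv.1 == [(pcStep x1 y1 x2 y2 m).1, (pcStep x1 y1 x2 y2 m).2]) = true
      · simp only [hany, if_true]
        obtain ⟨kv, hmem, hb⟩ := List.any_eq_true.1 hany
        symm
        apply List.all_eq_false.2
        refine ⟨kv, hmem, ?_⟩
        rw [pcOnPath_step x1 y1 x2 y2 m h, hb]
        simp
      · have hany' : (pod.any fun kv => kv.1 == [(pcStep x1 y1 x2 y2 m).1, (pcStep x1 y1 x2 y2 m).2]) = false := by
          exact Bool.eq_false_iff.2 hany
        have hkey := List.any_eq_false.1 hany'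
        simp only [hany', Bool.false_eq_true, if_false]
        rw [hrec, Bool.eq_iff_iff]
        simp only [List.all_eq_true]
        constructor
        · intro hall kv hmem
          rw [pcOnPath_step x1 y1 x2 y2 m h]
          simp only [Bool.not_eq_true', Bool.or_eq_false_iff]
          exact ⟨by simpa using hkey kv hmem, by simpa using hall kv hmem⟩
        · intro hall kv hmem
          have := hall kv hmem
          rw [pcOnPath_step x1 y1 x2 y2 m h] at this
          simp only [Bool.not_eq_true', Bool.or_eq_false_iff] at this
          simpa using this.2

-- ===== VERDICT (by name: the statement is the Claim_ definition above) =====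
theorem path_clear_spec : Claim_equal_path_clear := by
  intro x1 y1 x2 y2 m pod _
  unfold Spec_path_clear path_clear_alt
  exact path_clear_eq_all x2 y2 m pod _ x1 y1 le_rfl
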